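-- pv_equiv track=rewrite | github.com/AlexandraUrsu5/Ursu-Alexandra-3A6-Python | Lab2/ex9.py | Function
-- ===== SOURCE A (Python) =====
-- def Function(matrix):
--     n=len(matrix)
--     m = len(matrix[0])
--     r=n-1
--     c=0
--     list = []
--     while r > 0:
--         c=0
--         while c < m:
--             pre_r = r-1
--             ok = True
--             while pre_r > 0 and ok == True:
--                 if matrix[pre_r][c] >= matrix[r][c]:
--                     list.append(tuple((r,c)))
--                     ok=False
--                 pre_r = pre_r - 1
--             c = c + 1
--         r = r - 1
--     return list
-- ===== SOURCE B (Python) =====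
-- def Function(matrix):
--     n = len(matrix)
--     m = len(matrix[0])
--     out = []
--     pref = None
--     for r in range(1, n):
--         if pref is None:
--             pref = [matrix[r][c] for c in range(m)]
--         else:
--             out.append([(r, c) for c in range(m) if pref[c] >= matrix[r][c]])
--             pref = [matrix[r][c] if matrix[r][c] > pref[c] else pref[c] for c in range(m)]
--     res = []
--     for marks in reversed(out):
--         res.extend(marks)
--     return res
-- ===== Notes on version B (the rewrite author's own statement) =====
-- stated objective: alternative
-- what changed: Replaces the per-cell backward scan over all earlier rows by a single forward pass that maintains per-column prefix maxima of rows 1..r-1, collecting each row's marks and reversing at the end to keep A's descending-row output order.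
-- outside the precondition, e.g. on Function([[1, 2], [3]]): A returns [], B raises IndexError
import Mathlib
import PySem

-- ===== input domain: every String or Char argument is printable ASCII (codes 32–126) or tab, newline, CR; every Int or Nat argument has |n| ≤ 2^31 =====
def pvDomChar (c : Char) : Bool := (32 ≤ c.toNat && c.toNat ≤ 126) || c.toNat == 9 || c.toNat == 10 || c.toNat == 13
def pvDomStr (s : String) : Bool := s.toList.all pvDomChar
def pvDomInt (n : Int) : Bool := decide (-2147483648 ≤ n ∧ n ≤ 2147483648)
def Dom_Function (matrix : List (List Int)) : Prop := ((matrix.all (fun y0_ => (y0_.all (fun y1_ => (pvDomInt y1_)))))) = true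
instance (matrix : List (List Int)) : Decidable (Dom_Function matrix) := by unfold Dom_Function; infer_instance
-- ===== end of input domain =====

-- B replaces A's per-cell backward scan over all earlier rows by a single forward pass keeping per-column prefix maxima.

-- matrix[i][c]; all indices reached by either program are nonnegative and in range under Pre_
def pvCell (matrix : List (List Int)) (i c : Nat) : Int := (matrix.getD i []).getD c 0

-- ===== PORT A =====
-- innermost 'while pre_r > 0 and ok == True' loop; fuel = pre_r
def pvInnerA (matrix : List (List Int)) (r c : Nat) : Nat → Bool → List (Int × Int) → List (Int × Int)
  | 0, _, lst => lst
  | p + 1, ok, lst =>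
    if ok then
      if pvCell matrix (p + 1) c ≥ pvCell matrix r c then
        pvInnerA matrix r c p false (lst ++ [((r : Int), (c : Int))])
      else
        pvInnerA matrix r c p true lst
    else lst

-- middle 'while c < m' loop
def pvColsA (matrix : List (List Int)) (r m : Nat) (c : Nat) (lst : List (Int × Int)) : List (Int × Int) :=
  if _h : c < m then
    pvColsA matrix r m (c + 1) (pvInnerA matrix r c (r - 1) true lst)
  else lst
termination_by m - c

-- outer 'while r > 0' loop
def pvRowsA (matrix : List (List Int)) (m : Nat) : Nat → List (Int × Int) → List (Int × Int)
  | 0, lst => lst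
  | r + 1, lst => pvRowsA matrix m r (pvColsA matrix (r + 1) m 0 lst)

def Function (matrix : List (List Int)) : List (Int × Int) :=
  pvRowsA matrix ((PySem.List.pyGet? matrix 0).getD []).length (matrix.length - 1) []

-- ===== PORT B =====
-- one step of the 'for r in range(1, n)' loop; state = (pref, out)
def pvStepB (matrix : List (List Int)) (m : Nat)
    (st : Option (List Int) × List (List (Int × Int))) (r : Nat) :
    Option (List Int) × List (List (Int × Int)) :=
  match st with
  | (none, out) => (some ((List.range m).map (fun c => pvCell matrix r c)), out)
  | (some p, out) =>
      (some ((List.range m).map (fun c =>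
          if pvCell matrix r c > p.getD c 0 then pvCell matrix r c else p.getD c 0)),
       out ++ [((List.range m).filter (fun c => decide (p.getD c 0 ≥ pvCell matrix r c))).map
                 (fun c => ((r : Int), (c : Int)))])

def Function_alt (matrix : List (List Int)) : List (Int × Int) :=
  ((List.range' 1 (matrix.length - 1)).foldl
      (pvStepB matrix ((PySem.List.pyGet? matrix 0).getD []).length) (none, [])).2.reverse.flatten

-- ===== PRECONDITION & SPEC =====
-- Pre_ excludes the inputs on which the Python A raises IndexError (empty matrix; for n ≥ 3 a tail
-- row shorter than row 0), and additionally the degenerate two-row ragged matrices whose short second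
-- row A never inspects (A returns [] there) but on which B's natural prefix pass raises IndexError.
def Pre_Function (matrix : List (List Int)) : Prop :=
  matrix ≠ [] ∧ ∀ row ∈ matrix.tail, matrix.headI.length ≤ row.length
instance (matrix : List (List Int)) : Decidable (Pre_Function matrix) := by unfold Pre_Function; infer_instance

def pvWitness_Function : List (List Int) := [[5, 1], [3, 2], [4, 0]]

def Spec_Function (matrix : List (List Int)) (out : List (Int × Int)) : Prop := out = Function_alt matrix
instance (matrix : List (List Int)) (out : List (Int × Int)) : Decidable (Spec_Function matrix out) := by unfold Spec_Function; infer_instance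

-- ===== CLAIM (what is proved, stated in full; the proofs are below) =====
def Claim_equal_Function : Prop := ∀ (matrix : List (List Int)), Dom_Function matrix → Pre_Function matrix → Spec_Function matrix (Function matrix)

-- ===== LEMMAS AND PROOFS =====

-- whether some earlier row 1..r-1 dominates cell (r, c)
def pvHit (matrix : List (List Int)) (r c : Nat) : Bool :=
  (List.range' 1 (r - 1)).any (fun i => decide (pvCell matrix i c ≥ pvCell matrix r c))

-- marks of row r, columns in order
def pvMarks (matrix : List (List Int)) (m r : Nat) : List (Int × Int) :=
  ((List.range m).filter (fun c => pvHit matrix r c)).map (fun c => ((r : Int), (c : Int)))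

-- per-column prefix maximum over rows 1..k
def pvMaxCell (matrix : List (List Int)) (c : Nat) : Nat → Int
  | 0 => 0
  | 1 => pvCell matrix 1 c
  | (k + 2) =>
      if pvCell matrix (k + 2) c > pvMaxCell matrix c (k + 1) then pvCell matrix (k + 2) c
      else pvMaxCell matrix c (k + 1)

def pvPref (matrix : List (List Int)) (m k : Nat) : List Int :=
  (List.range m).map (fun c => pvMaxCell matrix c k)

def pvOuts (matrix : List (List Int)) (m : Nat) : Nat → List (List (Int × Int))
  | 0 => []
  | 1 => []
  | (k + 2) => pvOuts matrix m (k + 1) ++ [pvMarks matrix m (k + 2)]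

def pvDesc (matrix : List (List Int)) (m : Nat) : Nat → List (Int × Int)
  | 0 => []
  | (r + 1) => pvMarks matrix m (r + 1) ++ pvDesc matrix m r

theorem pvRange'_one_concat (p : Nat) : List.range' 1 (p + 1) = List.range' 1 p ++ [p + 1] := by
  rw [List.range'_concat]; norm_num [Nat.add_comm]

theorem pvInnerA_false (matrix : List (List Int)) (r c : Nat) (p : Nat) (lst : List (Int × Int)) :
    pvInnerA matrix r c p false lst = lst := by
  cases p <;> simp [pvInnerA]

theorem pvInnerA_spec (matrix : List (List Int)) (r c : Nat) (p : Nat) (lst : List (Int × Int)) :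
    pvInnerA matrix r c p true lst =
      lst ++ (if (List.range' 1 p).any (fun i => decide (pvCell matrix i c ≥ pvCell matrix r c))
              then [((r : Int), (c : Int))] else []) := by
  induction p generalizing lst with
  | zero => simp [pvInnerA]
  | succ q ih =>
      rw [pvInnerA, pvRange'_one_concat q]
      by_cases h : pvCell matrix (q + 1) c ≥ pvCell matrix r c
      · simp [h, pvInnerA_false]
      · rw [if_neg h, ih, List.any_append]
        have hone : ([q + 1].any fun i => decide (pvCell matrix i c ≥ pvCell matrix r c)) = false := by
          simp [h]
        rw [hone, Bool.or_false]
        simp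

theorem pvColsA_spec (matrix : List (List Int)) (r m : Nat) :
    ∀ (k c : Nat) (lst : List (Int × Int)), m - c = k →
    pvColsA matrix r m c lst =
      lst ++ (((List.range' c (m - c)).filter (fun j => pvHit matrix r j)).map
                (fun j => ((r : Int), (j : Int)))) := by
  intro k
  induction k with
  | zero =>
      intro c lst hk
      have hcm : ¬ c < m := by omega
      rw [pvColsA]
      simp [hcm, hk]
  | succ q ih =>
      intro c lst hk
      have hcm : c < m := by omega
      have hq : m - (c + 1) = q := by omega
      rw [pvColsA]
      simp only [hcm, dif_pos]
      rw [ih (c + 1) _ (by omega), pvInnerA_spec, hk, hq, List.range'_succ,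
        List.filter_cons, List.append_assoc]
      simp only [pvHit]
      by_cases h : ((List.range' 1 (r - 1)).any
          fun i => decide (pvCell matrix i c ≥ pvCell matrix r c)) = true
      · rw [if_pos h, if_pos h]; simp
      · rw [if_neg h, if_neg h]; simp

theorem pvRowsA_spec (matrix : List (List Int)) (m : Nat) (r : Nat) (lst : List (Int × Int)) :
    pvRowsA matrix m r lst = lst ++ pvDesc matrix m r := by
  induction r generalizing lst with
  | zero => simp [pvRowsA, pvDesc]
  | succ q ih =>
      rw [pvRowsA, ih, pvColsA_spec matrix (q + 1) m m 0 lst (by omega)]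
      rw [pvDesc]
      simp only [Nat.sub_zero, ← List.range_eq_range']
      rw [List.append_assoc]
      rfl

theorem pvMaxCell_ge_iff (matrix : List (List Int)) (c : Nat) :
    ∀ (k : Nat), 1 ≤ k → ∀ (x : Int),
      (pvMaxCell matrix c k ≥ x ↔ ∃ i ∈ List.range' 1 k, pvCell matrix i c ≥ x) := by
  intro k
  induction k with
  | zero => intro h; omega
  | succ q ih =>
      intro _ x
      cases q with
      | zero => simp [pvMaxCell, List.range'_one]
      | succ j =>
          have key : pvMaxCell matrix c (j + 2) ≥ x ↔
              pvMaxCell matrix c (j + 1) ≥ x ∨ pvCell matrix (j + 2) c ≥ x := by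
            simp only [pvMaxCell]; split_ifs with h <;> constructor <;> intro hx <;> omega
          rw [key, ih (by omega) x, pvRange'_one_concat (j + 1)]
          simp [List.mem_append]
          constructor
          · rintro (⟨i, hi, hx⟩ | hx)
            · exact ⟨i, Or.inl hi, hx⟩
            · exact ⟨j + 2, Or.inr rfl, hx⟩
          · rintro ⟨i, hi | rfl, hx⟩
            · exact Or.inl ⟨i, hi, hx⟩
            · exact Or.inr hx

theorem pvMapRange_getD (f : Nat → Int) (m c : Nat) (hc : c < m) :
    (((List.range m).map f).getD c 0) = f c := by
  simp [List.getD, hc]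

theorem pvFoldB_spec (matrix : List (List Int)) (m : Nat) :
    ∀ (k : Nat), 1 ≤ k →
    (List.range' 1 k).foldl (pvStepB matrix m) (none, []) =
      (some (pvPref matrix m k), pvOuts matrix m k) := by
  intro k
  induction k with
  | zero => intro h; omega
  | succ q ih =>
      intro _
      cases q with
      | zero =>
          simp [List.range'_one, pvStepB, pvPref, pvOuts, pvMaxCell]
      | succ j =>
          rw [pvRange'_one_concat (j + 1), List.foldl_append, ih (by omega)]
          simp only [List.foldl_cons, List.foldl_nil, pvStepB]
          rw [Prod.mk.injEq]
          refine ⟨?_, ?_⟩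
          · congr 1
            unfold pvPref
            apply List.map_congr_left
            intro c hc
            rw [pvMapRange_getD _ _ _ (List.mem_range.mp hc)]
            simp [pvMaxCell]
          · rw [pvOuts]
            have hfil : (List.range m).filter
                  (fun c => decide ((pvPref matrix m (j + 1)).getD c 0 ≥ pvCell matrix (j + 1 + 1) c))
                = (List.range m).filter (fun c => pvHit matrix (j + 1 + 1) c) := by
              apply List.filter_congr
              intro c hc
              simp only [pvPref, pvMapRange_getD _ _ _ (List.mem_range.mp hc)]
              have hiff := pvMaxCell_ge_iff matrix c (j + 1) (by omega) (pvCell matrix (j + 1 + 1) c)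
              simp only [pvHit, Nat.add_sub_cancel]
              rw [Bool.eq_iff_iff]
              simp [hiff, List.any_eq_true]
            rw [hfil]
            rfl

theorem pvOuts_flatten (matrix : List (List Int)) (m : Nat) :
    ∀ (k : Nat), 1 ≤ k → (pvOuts matrix m k).reverse.flatten = pvDesc matrix m k := by
  intro k
  induction k with
  | zero => intro h; omega
  | succ q ih =>
      intro _
      cases q with
      | zero => simp [pvOuts, pvDesc, pvMarks, pvHit]
      | succ j =>
          rw [pvOuts, pvDesc, List.reverse_append, List.flatten_append, ih (by omega)]
          simp

-- ===== VERDICT (by name: the statement is the Claim_ definition above) =====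
theorem Function_spec : Claim_equal_Function := by
  intro matrix _dom _pre
  unfold Spec_Function Function Function_alt
  cases hn : matrix.length - 1 with
  | zero => simp [pvRowsA, List.range']
  | succ k =>
      rw [pvRowsA_spec, pvFoldB_spec matrix _ (k + 1) (by omega),
        pvOuts_flatten matrix _ (k + 1) (by omega)]
      simp
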